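-- pv_equiv track=rewrite | github.com/Locnar68/HarrisPepe | scripts/job_intelligence.py | _followups
-- ===== SOURCE A (Python) =====
-- def _followups(query, ctx):
--     q = query.lower()
--     s = []
--     if any(w in q for w in ["loan","draw","balance","payment"]):
--         s += ["Any other draws?","Current loan balance?"]
--     elif any(w in q for w in ["permit","inspection","certificate"]):
--         s += ["When does the permit expire?","Are there any failed inspections?"]
--     elif any(w in q for w in ["apprais","value","comparable"]):
--         s += ["Comparable sales used?","Site value?"]
--     elif any(w in q for w in ["claim","insurance","adjuster"]):
--         s += ["Who is the insurer?","Approved scope amount?"]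
--     elif any(w in q for w in ["owner","lender","contact"]):
--         s += ["Permits for this owner?","Who is the lender?"]
--     else:
--         s += ["Any permits on file?","What documents exist for this job?"]
--     if ctx: s.append(f"More on {ctx}?")
--     return s[:3]
-- ===== SOURCE B (Python) =====
-- _KEYWORD_CATEGORY = [
--     ("loan", 0), ("draw", 0), ("balance", 0), ("payment", 0),
--     ("permit", 1), ("inspection", 1), ("certificate", 1),
--     ("apprais", 2), ("value", 2), ("comparable", 2),
--     ("claim", 3), ("insurance", 3), ("adjuster", 3),
--     ("owner", 4), ("lender", 4), ("contact", 4),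
-- ]
--
-- _RESPONSES = [
--     ["Any other draws?", "Current loan balance?"],
--     ["When does the permit expire?", "Are there any failed inspections?"],
--     ["Comparable sales used?", "Site value?"],
--     ["Who is the insurer?", "Approved scope amount?"],
--     ["Permits for this owner?", "Who is the lender?"],
--     ["Any permits on file?", "What documents exist for this job?"],
-- ]
--
--
-- def _followups(query, ctx):
--     # Score every keyword against the query and keep the highest-priority
--     # (lowest-index) matching category; index 5 is the default pair.
--     q = query.lower()
--     best = 5
--     for w, i in _KEYWORD_CATEGORY:
--         if w in q:
--             best = min(best, i)
--     s = _RESPONSES[best] + ([f"More on {ctx}?"] if ctx else [])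
--     return s[:3]
-- ===== Notes on version B (the rewrite author's own statement) =====
-- stated objective: alternative
-- what changed: Replaces the first-match if/elif chain with an exhaustive scan over a flat keyword-to-category-index table that keeps the minimum (highest-priority) matching index, then selects the response pair from an indexed table; the default is index 5 when nothing matches.
import Mathlib
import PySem

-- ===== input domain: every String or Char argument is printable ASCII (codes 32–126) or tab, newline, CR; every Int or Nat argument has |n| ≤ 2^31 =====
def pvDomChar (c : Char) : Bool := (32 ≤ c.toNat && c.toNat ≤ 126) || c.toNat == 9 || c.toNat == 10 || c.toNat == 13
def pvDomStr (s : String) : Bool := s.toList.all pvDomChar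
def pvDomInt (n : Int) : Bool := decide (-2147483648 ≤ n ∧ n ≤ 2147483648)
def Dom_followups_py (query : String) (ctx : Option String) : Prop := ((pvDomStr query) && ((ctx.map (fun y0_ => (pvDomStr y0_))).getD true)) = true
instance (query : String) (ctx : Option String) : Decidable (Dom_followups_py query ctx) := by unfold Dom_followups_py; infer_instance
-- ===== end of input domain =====

-- B replaces A's first-match if/elif chain with an exhaustive minimum-index scan over a flat
-- keyword→category table plus an indexed response table (alternative algorithm, same cost class).

-- ===== PORT A =====
-- literal transliteration of A's if/elif chain
def followups_py (query : String) (ctx : Option String) : List String :=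
  let q := PySem.Str.lower query
  let s : List String := []
  let s :=
    if ["loan", "draw", "balance", "payment"].any (fun w => PySem.Str.isIn w q) then
      s ++ ["Any other draws?", "Current loan balance?"]
    else if ["permit", "inspection", "certificate"].any (fun w => PySem.Str.isIn w q) then
      s ++ ["When does the permit expire?", "Are there any failed inspections?"]
    else if ["apprais", "value", "comparable"].any (fun w => PySem.Str.isIn w q) then
      s ++ ["Comparable sales used?", "Site value?"]
    else if ["claim", "insurance", "adjuster"].any (fun w => PySem.Str.isIn w q) then
      s ++ ["Who is the insurer?", "Approved scope amount?"]
    else if ["owner", "lender", "contact"].any (fun w => PySem.Str.isIn w q) then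
      s ++ ["Permits for this owner?", "Who is the lender?"]
    else
      s ++ ["Any permits on file?", "What documents exist for this job?"]
  let s :=
    match ctx with                         -- `if ctx:` — truthy iff some non-empty string
    | some c => if c ≠ "" then s ++ ["More on " ++ c ++ "?"] else s
    | none => s
  PySem.List.slice s none (some 3)

-- ===== PORT B =====
-- Source B's flat keyword → category-index table
def fuKeywordCategory : List (String × Int) :=
  [ ("loan", 0), ("draw", 0), ("balance", 0), ("payment", 0),
    ("permit", 1), ("inspection", 1), ("certificate", 1),
    ("apprais", 2), ("value", 2), ("comparable", 2),
    ("claim", 3), ("insurance", 3), ("adjuster", 3),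
    ("owner", 4), ("lender", 4), ("contact", 4) ]

-- Source B's indexed response table; index 5 is the default pair
def fuResponses : List (List String) :=
  [ ["Any other draws?", "Current loan balance?"],
    ["When does the permit expire?", "Are there any failed inspections?"],
    ["Comparable sales used?", "Site value?"],
    ["Who is the insurer?", "Approved scope amount?"],
    ["Permits for this owner?", "Who is the lender?"],
    ["Any permits on file?", "What documents exist for this job?"] ]

def followups_py_alt (query : String) (ctx : Option String) : List String :=
  let q := PySem.Str.lower query
  -- the minimum-index scan: best = 5; for w, i in table: if w in q: best = min(best, i)
  let best : Int :=
    fuKeywordCategory.foldl (fun best wi => if PySem.Str.isIn wi.1 q then min best wi.2 else best) 5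
  -- _RESPONSES[best]: best ∈ [0,5] always, so the lookup never fails
  let s := (PySem.List.pyGet? fuResponses best).getD []
  let s :=
    s ++ (match ctx with                   -- `[...] if ctx else []`
          | some c => if c ≠ "" then ["More on " ++ c ++ "?"] else []
          | none => [])
  PySem.List.slice s none (some 3)

-- ===== PRECONDITION & SPEC =====
def Spec_followups_py (query : String) (ctx : Option String) (out : List String) : Prop := out = followups_py_alt query ctx
instance (query : String) (ctx : Option String) (out : List String) : Decidable (Spec_followups_py query ctx out) := by unfold Spec_followups_py; infer_instance

-- ===== CLAIM (what is proved, stated in full; the proofs are below) =====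
def Claim_equal_followups_py : Prop := ∀ (query : String) (ctx : Option String), Dom_followups_py query ctx → Spec_followups_py query ctx (followups_py query ctx)

-- ===== LEMMAS AND PROOFS =====

-- folding one keyword group (all pairs carrying the same index i) lowers the accumulator to
-- min a i exactly when some keyword of the group matches
theorem fu_group_fold (p : String → Bool) (ws : List String) (i a : Int) :
    List.foldl (fun b (wi : String × Int) => if p wi.1 then min b wi.2 else b) a
      (ws.map (fun w => (w, i))) =
    if ws.any p then min a i else a := by
  induction ws generalizing a with
  | nil => simp
  | cons w t ih =>
    simp only [List.map_cons, List.foldl_cons, List.any_cons]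
    by_cases hw : p w
    · rw [ih]; simp [hw]
    · rw [ih]; simp [hw]

-- B's minimum-index fold equals the index of A's first matching branch (6th branch = default 5)
theorem fu_fold_eq_chain_idx (q : String) :
    fuKeywordCategory.foldl
      (fun best wi => if PySem.Str.isIn wi.1 q then min best wi.2 else best) 5 =
    (if ["loan", "draw", "balance", "payment"].any (fun w => PySem.Str.isIn w q) then (0 : Int)
     else if ["permit", "inspection", "certificate"].any (fun w => PySem.Str.isIn w q) then 1
     else if ["apprais", "value", "comparable"].any (fun w => PySem.Str.isIn w q) then 2
     else if ["claim", "insurance", "adjuster"].any (fun w => PySem.Str.isIn w q) then 3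
     else if ["owner", "lender", "contact"].any (fun w => PySem.Str.isIn w q) then 4
     else 5) := by
  have htab : fuKeywordCategory =
      (["loan", "draw", "balance", "payment"].map (fun w => (w, (0 : Int)))) ++
      ((["permit", "inspection", "certificate"].map (fun w => (w, 1))) ++
       ((["apprais", "value", "comparable"].map (fun w => (w, 2))) ++
        ((["claim", "insurance", "adjuster"].map (fun w => (w, 3))) ++
         (["owner", "lender", "contact"].map (fun w => (w, 4)))))) := rfl
  rw [htab]
  simp only [List.foldl_append, fu_group_fold (fun w => PySem.Str.isIn w q)]
  split_ifs <;> omega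

-- ===== VERDICT (by name: the statement is the Claim_ definition above) =====
theorem followups_py_spec : Claim_equal_followups_py := by
  intro query ctx _
  unfold Spec_followups_py followups_py followups_py_alt
  simp only [fu_fold_eq_chain_idx]
  split_ifs <;>
    cases ctx with
    | none => rfl
    | some c => by_cases hc : c = "" <;> simp [hc, fuResponses, PySem.List.pyGet?, PySem.List.pyIdx?]
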